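-- pv_equiv track=rewrite | github.com/davidting0918/python-leetcode-solutions | solutions/2294-partition-array-such-that-maximum-difference-is-k.py | partitionArray
-- ===== SOURCE A (Python) =====
-- from typing import List
--
-- def partitionArray(nums: List[int], k: int) -> int:
--
--     nums.sort()
--     n = len(nums)
--
--     dp = [0] * n
--     index = 0
--     dp[0] = nums[0]
--     for i in range(1, n):
--         if nums[i] - dp[index] > k:
--             index += 1
--             dp[index] = nums[i]
--         else:
--             dp[index] = min(dp[index], nums[i])
--
--     return index + 1
-- ===== SOURCE B (Python) =====
-- def partitionArray(nums, k):
--     # Sorts nums in place like the original; on the empty list it returns 0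
--     # (the original raises IndexError there).
--     nums.sort()
--     n = len(nums)
--     count = 0
--     i = 0
--     while i < n:
--         count += 1
--         target = nums[i] + k
--         # binary search: first index in (i, n) whose value exceeds target
--         lo, hi = i + 1, n
--         while lo < hi:
--             mid = (lo + hi) // 2
--             if nums[mid] <= target:
--                 lo = mid + 1
--             else:
--                 hi = mid
--         i = lo
--     return count
-- ===== Notes on version B (the rewrite author's own statement) =====
-- stated objective: faster
-- what changed: Replaces the element-by-element scan with a dp array by a group-by-group traversal that binary-searches each group's boundary (first element exceeding start+k) and counts one group per jump; no dp array is kept. Pre_ excludes only the empty list, on which A raises IndexError (B returns 0 there).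
import Mathlib
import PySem

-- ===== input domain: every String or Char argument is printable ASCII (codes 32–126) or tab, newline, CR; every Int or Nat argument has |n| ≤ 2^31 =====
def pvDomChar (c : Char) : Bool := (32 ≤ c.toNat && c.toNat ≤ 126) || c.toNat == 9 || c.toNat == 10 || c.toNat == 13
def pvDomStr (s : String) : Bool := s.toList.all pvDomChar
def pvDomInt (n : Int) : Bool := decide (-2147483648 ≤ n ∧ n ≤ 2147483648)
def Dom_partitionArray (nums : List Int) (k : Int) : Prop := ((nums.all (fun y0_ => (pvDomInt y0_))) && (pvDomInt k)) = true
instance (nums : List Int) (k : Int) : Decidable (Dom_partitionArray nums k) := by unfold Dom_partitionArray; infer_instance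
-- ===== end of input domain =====

-- B replaces A's element-by-element scan by group-by-group jumps found with a hand-written
-- binary search (bisect_right style). Both Pythons sort `nums` in place (same side effect);
-- the equivalence proved here is about the return value.

-- ===== PORT A =====
def partitionArray (nums : List Int) (k : Int) : Int :=
  let s := PySem.List.sorted nums (fun x => x) false
  let n := s.length
  let dp0 : List Int := List.replicate n 0
  -- dp[0] = nums[0]: on the empty list Python raises IndexError here (excluded by Pre_)
  let dp1 := PySem.List.pySetD dp0 0 (PySem.List.pyGetD s 0 0)
  let r := (PySem.List.pyRange 1 (n : Int)).foldl (fun st i =>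
      if PySem.List.pyGetD s i 0 - PySem.List.pyGetD st.1 st.2 0 > k then
        (PySem.List.pySetD st.1 (st.2 + 1) (PySem.List.pyGetD s i 0), st.2 + 1)
      else
        (PySem.List.pySetD st.1 st.2
          (min (PySem.List.pyGetD st.1 st.2 0) (PySem.List.pyGetD s i 0)), st.2))
    (dp1, (0 : Int))
  r.2 + 1

-- ===== PORT B =====
-- Source B's inner `while lo < hi` binary search (indices are nonnegative Python ints => Nat;
-- (lo+hi)//2 on nonnegative ints is Nat division, exact). The extra `fuel` argument only
-- encodes termination (hi - lo shrinks every iteration); it changes no computed value.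
def pvBisect (s : List Int) (target : Int) : Nat → Nat → Nat → Nat
  | 0, lo, _ => lo
  | fuel + 1, lo, hi =>
    if lo < hi then
      let mid := (lo + hi) / 2
      if PySem.List.pyGetD s (mid : Int) 0 ≤ target then pvBisect s target fuel (mid + 1) hi
      else pvBisect s target fuel lo mid
    else lo

-- Source B's outer `while i < n` loop (fuel = n - i, again only a termination bound)
def pvAltLoop (s : List Int) (k : Int) : Nat → Nat → Int → Int
  | 0, _, count => count
  | fuel + 1, i, count =>
    if i < s.length then
      pvAltLoop s k fuel
        (pvBisect s (PySem.List.pyGetD s (i : Int) 0 + k) (s.length - (i + 1)) (i + 1) s.length)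
        (count + 1)
    else count

def partitionArray_alt (nums : List Int) (k : Int) : Int :=
  let s := PySem.List.sorted nums (fun x => x) false
  pvAltLoop s k s.length 0 0

-- ===== PRECONDITION & SPEC =====
-- Pre_ excludes only the empty list, on which A raises IndexError at dp[0] = nums[0].
def Pre_partitionArray (nums : List Int) (k : Int) : Prop := nums ≠ []
instance (nums : List Int) (k : Int) : Decidable (Pre_partitionArray nums k) := by
  unfold Pre_partitionArray; infer_instance
def pvWitness_partitionArray : List Int × Int := ([3, 6, 1, 2, 5], 2)


def Spec_partitionArray (nums : List Int) (k : Int) (out : Int) : Prop := out = partitionArray_alt nums k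
instance (nums : List Int) (k : Int) (out : Int) : Decidable (Spec_partitionArray nums k out) := by
  unfold Spec_partitionArray; infer_instance

-- ===== CLAIM (what is proved, stated in full; the proofs are below) =====
def Claim_equal_partitionArray : Prop := ∀ (nums : List Int) (k : Int), Dom_partitionArray nums k → Pre_partitionArray nums k → Spec_partitionArray nums k (partitionArray nums k)

-- ===== LEMMAS AND PROOFS =====

-- common greedy reference: scan the sorted list from index i, current group started at index j
def pvGc (s : List Int) (k : Int) (j i : Nat) (c : Int) : Int :=
  if _h : i < s.length then
    if s.getD i 0 - s.getD j 0 > k then pvGc s k i (i + 1) (c + 1)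
    else pvGc s k j (i + 1) c
  else c
termination_by s.length - i

theorem pvBisect_ge (s : List Int) (t : Int) :
    ∀ (fuel lo hi : Nat), lo ≤ pvBisect s t fuel lo hi := by
  intro fuel
  induction fuel with
  | zero => intro lo hi; simp [pvBisect]
  | succ fuel ih =>
    intro lo hi
    rw [pvBisect]
    by_cases h : lo < hi
    · rw [if_pos h]
      by_cases hle : PySem.List.pyGetD s (((lo + hi) / 2 : Nat) : Int) 0 ≤ t
      · simp only [hle, if_true]
        have := ih ((lo + hi) / 2 + 1) hi
        omega
      · simp only [hle, if_false]
        exact ih lo ((lo + hi) / 2)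
    · rw [if_neg h]

theorem pvBisect_spec (s : List Int) (t : Int)
    (mono : ∀ p q : Nat, p ≤ q → q < s.length → s.getD p 0 ≤ s.getD q 0) :
    ∀ (fuel lo hi : Nat), hi - lo ≤ fuel → lo ≤ hi → hi ≤ s.length →
      pvBisect s t fuel lo hi ≤ hi ∧
      (∀ m, lo ≤ m → m < pvBisect s t fuel lo hi → s.getD m 0 ≤ t) ∧
      (∀ m, pvBisect s t fuel lo hi ≤ m → m < hi → t < s.getD m 0) := by
  intro fuel
  induction fuel with
  | zero =>
    intro lo hi hf hlohi hhilen
    have : lo = hi := by omega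
    subst this
    simp only [pvBisect]
    exact ⟨le_refl _, by omega, by omega⟩
  | succ fuel ih =>
    intro lo hi hf hlohi hhilen
    rw [pvBisect]
    by_cases h : lo < hi
    · rw [if_pos h]
      by_cases hle : PySem.List.pyGetD s (((lo + hi) / 2 : Nat) : Int) 0 ≤ t
      · simp only [hle, if_true]
        rw [PySem.List.pyGetD_natCast] at hle
        obtain ⟨ih1, ih2, ih3⟩ := ih ((lo + hi) / 2 + 1) hi (by omega) (by omega) hhilen
        refine ⟨ih1, ?_, ih3⟩
        intro m hm1 hm2
        by_cases hcmp : (lo + hi) / 2 + 1 ≤ m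
        · exact ih2 m hcmp hm2
        · exact le_trans (mono m ((lo + hi) / 2) (by omega) (by omega)) hle
      · simp only [hle, if_false]
        rw [PySem.List.pyGetD_natCast] at hle
        have hlt : t < s.getD ((lo + hi) / 2) 0 := by omega
        obtain ⟨ih1, ih2, ih3⟩ := ih lo ((lo + hi) / 2) (by omega) (by omega) (by omega)
        refine ⟨by omega, ih2, ?_⟩
        intro m hm1 hm2
        by_cases hcmp : m < (lo + hi) / 2
        · exact ih3 m hm1 hcmp
        · exact lt_of_lt_of_le hlt (mono ((lo + hi) / 2) m (by omega) (by omega))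
    · rw [if_neg h]
      exact ⟨hlohi, by omega, by omega⟩

theorem pvAfold (s : List Int) (k : Int)
    (mono : ∀ p q : Nat, p ≤ q → q < s.length → s.getD p 0 ≤ s.getD q 0) :
    ∀ (i : Nat), i ≤ s.length → ∀ (dp : List Int) (index j : Nat),
      dp.length = s.length → index ≤ j → j < i →
      dp.getD index 0 = s.getD j 0 →
      ((PySem.List.pyRange (i : Int) (s.length : Int)).foldl (fun st x =>
        if PySem.List.pyGetD s x 0 - PySem.List.pyGetD st.1 st.2 0 > k then
          (PySem.List.pySetD st.1 (st.2 + 1) (PySem.List.pyGetD s x 0), st.2 + 1)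
        else
          (PySem.List.pySetD st.1 st.2
            (min (PySem.List.pyGetD st.1 st.2 0) (PySem.List.pyGetD s x 0)), st.2))
        (dp, (index : Int))).2 + 1 = pvGc s k j i ((index : Int) + 1) := by
  have main : ∀ fuel i, s.length - i ≤ fuel → i ≤ s.length →
      ∀ (dp : List Int) (index j : Nat),
      dp.length = s.length → index ≤ j → j < i →
      dp.getD index 0 = s.getD j 0 →
      ((PySem.List.pyRange (i : Int) (s.length : Int)).foldl (fun st x =>
        if PySem.List.pyGetD s x 0 - PySem.List.pyGetD st.1 st.2 0 > k then
          (PySem.List.pySetD st.1 (st.2 + 1) (PySem.List.pyGetD s x 0), st.2 + 1)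
        else
          (PySem.List.pySetD st.1 st.2
            (min (PySem.List.pyGetD st.1 st.2 0) (PySem.List.pyGetD s x 0)), st.2))
        (dp, (index : Int))).2 + 1 = pvGc s k j i ((index : Int) + 1) := by
    intro fuel
    induction fuel with
    | zero =>
      intro i hf hi dp index j hdp hij hji hval
      have hieq : i = s.length := by omega
      subst hieq
      rw [PySem.List.pyRange_one_eq_nil (le_refl _)]
      rw [pvGc]
      simp only [dif_neg (lt_irrefl s.length)]
      rfl
    | succ fuel ihf =>
      intro i hf hi dp index j hdp hij hji hval
      by_cases hilt : i < s.length
      · rw [PySem.List.pyRange_one_cons (by exact_mod_cast hilt)]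
        rw [show ((i : Int) + 1) = (((i + 1 : Nat)) : Int) by push_cast; ring]
        rw [List.foldl_cons]
        rw [pvGc]
        simp only [dif_pos hilt]
        have hgi : PySem.List.pyGetD s (i : Int) 0 = s.getD i 0 :=
          PySem.List.pyGetD_natCast s i 0
        have hgidx : PySem.List.pyGetD dp ((index : Int)) 0 = dp.getD index 0 :=
          PySem.List.pyGetD_natCast dp index 0
        by_cases hcond : s.getD i 0 - s.getD j 0 > k
        · rw [if_pos (by rw [hgi, hgidx, hval]; exact hcond)]
          rw [if_pos hcond]
          have hset : PySem.List.pySetD dp ((index : Int) + 1) (PySem.List.pyGetD s (i : Int) 0)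
              = dp.set (index + 1) (s.getD i 0) := by
            rw [hgi]
            have : ((index : Int) + 1) = ((index + 1 : Nat) : Int) := by push_cast; ring
            rw [this, PySem.List.pySetD_natCast]
          rw [hset]
          have hidx1 : index + 1 < dp.length := by omega
          have hcast : ((index : Int) + 1) = (((index + 1 : Nat)) : Int) := by push_cast; ring
          rw [hcast]
          rw [ihf (i + 1) (by omega) (by omega) (dp.set (index + 1) (s.getD i 0)) (index + 1) i
            (by simp [hdp]) (by omega) (by omega)
            (by simp [List.getD, hidx1])]
        · rw [if_neg (by rw [hgi, hgidx, hval]; exact hcond)]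
          rw [if_neg hcond]
          have hmin : min (PySem.List.pyGetD dp ((index : Int)) 0) (PySem.List.pyGetD s (i : Int) 0)
              = s.getD j 0 := by
            rw [hgi, hgidx, hval]
            exact min_eq_left (mono j i (by omega) hilt)
          have hset : PySem.List.pySetD dp ((index : Int))
              (min (PySem.List.pyGetD dp ((index : Int)) 0) (PySem.List.pyGetD s (i : Int) 0))
              = dp.set index (s.getD j 0) := by
            rw [hmin, PySem.List.pySetD_natCast]
          rw [hset]
          have hidx : index < dp.length := by omega
          exact ihf (i + 1) (by omega) (by omega) (dp.set index (s.getD j 0)) index j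
            (by simp [hdp]) hij (by omega)
            (by simp [List.getD, hidx])
      · have hieq : i = s.length := by omega
        subst hieq
        rw [PySem.List.pyRange_one_eq_nil (le_refl _)]
        rw [pvGc]
        simp only [dif_neg (lt_irrefl s.length)]
        rfl
  intro i hi dp index j hdp hij hji hval
  exact main (s.length - i) i (le_refl _) hi dp index j hdp hij hji hval

theorem pvGc_skip (s : List Int) (k : Int) (i jj : Nat)
    (hjle : jj ≤ s.length)
    (hle : ∀ m, i < m → m < jj → s.getD m 0 - s.getD i 0 ≤ k)
    (hgt : jj < s.length → s.getD jj 0 - s.getD i 0 > k) :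
    ∀ m, i < m → m ≤ jj → ∀ c : Int,
      pvGc s k i m c = if jj < s.length then pvGc s k jj (jj + 1) (c + 1) else c := by
  have main : ∀ fuel m, jj - m ≤ fuel → i < m → m ≤ jj → ∀ c : Int,
      pvGc s k i m c = if jj < s.length then pvGc s k jj (jj + 1) (c + 1) else c := by
    intro fuel
    induction fuel with
    | zero =>
      intro m hf him hmjj c
      have hmeq : m = jj := by omega
      rw [hmeq]
      rw [pvGc]
      by_cases hjlt : jj < s.length
      · simp only [dif_pos hjlt, if_pos hjlt, if_pos (hgt hjlt)]
      · simp only [dif_neg hjlt, if_neg hjlt]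
    | succ fuel ihf =>
      intro m hf him hmjj c
      by_cases hmeq : m = jj
      · rw [hmeq]
        rw [pvGc]
        by_cases hjlt : jj < s.length
        · simp only [dif_pos hjlt, if_pos hjlt, if_pos (hgt hjlt)]
        · simp only [dif_neg hjlt, if_neg hjlt]
      · have hmlt : m < jj := by omega
        rw [pvGc]
        have hmlen : m < s.length := by omega
        simp only [dif_pos hmlen]
        rw [if_neg (by have := hle m him hmlt; omega)]
        exact ihf (m + 1) (by omega) (by omega) (by omega) c
  intro m him hmjj c
  exact main jj m (by omega) him hmjj c

theorem pvAltLoop_done (s : List Int) (k : Int) :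
    ∀ (fuel i : Nat) (c : Int), ¬ i < s.length → pvAltLoop s k fuel i c = c := by
  intro fuel i c h
  cases fuel with
  | zero => rfl
  | succ fuel => simp [pvAltLoop, h]

theorem pvAlt_eq_gc (s : List Int) (k : Int)
    (mono : ∀ p q : Nat, p ≤ q → q < s.length → s.getD p 0 ≤ s.getD q 0) :
    ∀ (fuel i : Nat), s.length - i ≤ fuel → i < s.length → ∀ (c : Int),
      pvAltLoop s k fuel i c = pvGc s k i (i + 1) (c + 1) := by
  intro fuel
  induction fuel with
  | zero => intro i hf hi c; omega
  | succ fuel ihf =>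
    intro i hf hi c
    rw [pvAltLoop]
    rw [if_pos hi]
    set t := PySem.List.pyGetD s (i : Int) 0 + k with ht
    set jj := pvBisect s t (s.length - (i + 1)) (i + 1) s.length with hjj
    have hge : i + 1 ≤ jj := by rw [hjj]; exact pvBisect_ge s t _ (i + 1) s.length
    obtain ⟨hle', hpre, hpost⟩ :=
      pvBisect_spec s t mono (s.length - (i + 1)) (i + 1) s.length (le_refl _) (by omega) (le_refl _)
    rw [← hjj] at hle' hpre hpost
    have hti : t = s.getD i 0 + k := by rw [ht, PySem.List.pyGetD_natCast]
    have hskip := pvGc_skip s k i jj hle'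
      (fun m hm1 hm2 => by have := hpre m (by omega) hm2; omega)
      (fun hjlt => by have := hpost jj (le_refl _) hjlt; omega)
    rw [hskip (i + 1) (by omega) (by omega) (c + 1)]
    by_cases hjlt : jj < s.length
    · rw [if_pos hjlt]
      exact ihf jj (by omega) hjlt (c + 1)
    · rw [if_neg hjlt]
      exact pvAltLoop_done s k fuel jj (c + 1) hjlt

-- ===== VERDICT (by name: the statement is the Claim_ definition above) =====
theorem partitionArray_spec : Claim_equal_partitionArray := by
  unfold Claim_equal_partitionArray Spec_partitionArray Pre_partitionArray
  intro nums k _ hne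
  unfold partitionArray partitionArray_alt
  set s := PySem.List.sorted nums (fun x => x) false with hs
  have hsne : s ≠ [] := by
    rw [hs]; rw [Ne, PySem.List.sorted_eq_nil_iff]; exact hne
  have hslen : 0 < s.length := List.length_pos_iff.mpr hsne
  have mono : ∀ p q : Nat, p ≤ q → q < s.length → s.getD p 0 ≤ s.getD q 0 := by
    intro p q hpq hq
    rw [List.getD_eq_getElem s 0 (by omega), List.getD_eq_getElem s 0 hq]
    exact PySem.List.sorted_id_getElem_mono nums hpq (by rw [← hs] at *; exact hq)
  have hget0 : PySem.List.pyGetD s 0 0 = s.getD 0 0 := PySem.List.pyGetD_ofNat' s 0 0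
  have hset0 : PySem.List.pySetD (List.replicate s.length (0 : Int)) 0 (PySem.List.pyGetD s 0 0)
      = (List.replicate s.length (0 : Int)).set 0 (s.getD 0 0) := by
    rw [hget0]
    exact PySem.List.pySetD_of_nonneg _ _ (by norm_num)
  simp only [hset0]
  have hdp : ((List.replicate s.length (0 : Int)).set 0 (s.getD 0 0)).getD 0 0 = s.getD 0 0 := by
    simp [List.getD, List.getElem?_set_self (by simpa using hslen : 0 < (List.replicate s.length (0:Int)).length)]
  have hA := pvAfold s k mono 1 (by omega)
    ((List.replicate s.length (0 : Int)).set 0 (s.getD 0 0)) 0 0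
    (by simp) (le_refl 0) (by omega) hdp
  have hB := pvAlt_eq_gc s k mono s.length 0 (by omega) hslen 0
  simp only [Nat.cast_zero] at hA hB
  rw [hB]
  simp only [Nat.cast_one] at hA ⊢
  rw [← hA]
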